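-- pv_equiv track=rewrite | github.com/NdiforJoe/aws-well-architected-security-mcp-server | src/notifications.py | generate_basic_summary
-- ===== SOURCE A (Python) =====
-- from typing import List, Dict
--
-- def generate_basic_summary(findings: List[Dict], region: str) -> str:
--     """
--     Fallback: Generate a basic summary without Bedrock.
--     """
--     critical_count = len([f for f in findings if f.get('severity', '').lower() == 'critical'])
--     high_count = len([f for f in findings if f.get('severity', '').lower() == 'high'])
--     medium_count = len([f for f in findings if f.get('severity', '').lower() == 'medium'])
--
--     if critical_count > 0:
--         posture = "CRITICAL - Immediate Action Required"
--     elif high_count > 2: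
--         posture = "CONCERNING - Prompt Remediation Needed"
--     elif high_count > 0:
--         posture = "MODERATE - Address High-Priority Issues"
--     else:
--         posture = "STABLE - Continue Monitoring"
--
--     summary = f"""Security Posture Assessment - {region}
--
-- Status: {posture}
--
-- The security assessment identified {len(findings)} total findings: {critical_count} Critical, {high_count} High, and {medium_count} Medium severity issues.
--
-- Key Risks:
-- - Critical security controls require immediate attention
-- - Compliance gaps exist in logging and monitoring
-- - Network security configurations need review
--
-- Recommended Actions:
-- 1. Address all Critical findings within 24 hours
-- 2. Implement recommended security controls
-- 3. Schedule follow-up assessment in 7 days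
-- """
--     return summary
-- ===== SOURCE B (Python) =====
-- from typing import List, Dict
--
-- def generate_basic_summary(findings: List[Dict], region: str) -> str:
--     """
--     Fallback: Generate a basic summary without Bedrock.
--     """
--     sevs = sorted(f.get('severity', '').lower() for f in findings)
--     counts = {}
--     rest = sevs
--     while rest:
--         sev = rest[0]
--         k = 1
--         while k < len(rest) and rest[k] == sev:
--             k += 1
--         counts[sev] = k
--         rest = rest[k:]
--
--     critical_count = counts.get('critical', 0)
--     high_count = counts.get('high', 0)
--     medium_count = counts.get('medium', 0)
--
--     if critical_count > 0:
--         posture = "CRITICAL - Immediate Action Required"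
--     elif high_count > 2:
--         posture = "CONCERNING - Prompt Remediation Needed"
--     elif high_count > 0:
--         posture = "MODERATE - Address High-Priority Issues"
--     else:
--         posture = "STABLE - Continue Monitoring"
--
--     summary = f"""Security Posture Assessment - {region}
--
-- Status: {posture}
--
-- The security assessment identified {len(findings)} total findings: {critical_count} Critical, {high_count} High, and {medium_count} Medium severity issues.
--
-- Key Risks:
-- - Critical security controls require immediate attention
-- - Compliance gaps exist in logging and monitoring
-- - Network security configurations need review
--
-- Recommended Actions:
-- 1. Address all Critical findings within 24 hours
-- 2. Implement recommended security controls
-- 3. Schedule follow-up assessment in 7 days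
-- """
--     return summary
-- ===== Notes on version B (the rewrite author's own statement) =====
-- stated objective: alternative
-- what changed: Replaces A's three filtered scans with a sort-then-scan algorithm: B sorts the lowercased severities and counts contiguous runs in one pass over the sorted list, then reads the three counts from the run table.
import Mathlib
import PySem

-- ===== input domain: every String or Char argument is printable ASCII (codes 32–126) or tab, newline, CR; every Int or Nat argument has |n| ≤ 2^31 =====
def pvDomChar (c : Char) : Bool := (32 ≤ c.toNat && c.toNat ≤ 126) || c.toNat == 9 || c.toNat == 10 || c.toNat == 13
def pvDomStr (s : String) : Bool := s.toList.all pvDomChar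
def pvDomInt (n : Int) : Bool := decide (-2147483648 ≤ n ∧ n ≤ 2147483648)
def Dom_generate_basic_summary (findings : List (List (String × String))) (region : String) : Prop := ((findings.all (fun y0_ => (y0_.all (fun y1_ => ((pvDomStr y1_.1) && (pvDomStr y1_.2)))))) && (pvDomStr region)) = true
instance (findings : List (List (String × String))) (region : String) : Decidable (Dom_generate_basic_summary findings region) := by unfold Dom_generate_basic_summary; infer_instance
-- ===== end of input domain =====

-- B replaces A's three filtered scans with sort + one run-length scan; return value only.

-- shared helpers (the identical severity lookup and f-string of A and B)
def pvSeverityOf (f : List (String × String)) : String :=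
  PySem.Str.lower ((PySem.Dict.mk f).getD "severity" "")

def pvRender (region : String) (total critical_count high_count medium_count : Int) : String :=
  let posture :=
    if critical_count > 0 then "CRITICAL - Immediate Action Required"
    else if high_count > 2 then "CONCERNING - Prompt Remediation Needed"
    else if high_count > 0 then "MODERATE - Address High-Priority Issues"
    else "STABLE - Continue Monitoring"
  "Security Posture Assessment - " ++ region ++ "\n\nStatus: " ++ posture ++
  "\n\nThe security assessment identified " ++ PySem.Int.toStr total ++
  " total findings: " ++ PySem.Int.toStr critical_count ++ " Critical, " ++
  PySem.Int.toStr high_count ++ " High, and " ++ PySem.Int.toStr medium_count ++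
  " Medium severity issues.\n\nKey Risks:\n- Critical security controls require immediate attention\n- Compliance gaps exist in logging and monitoring\n- Network security configurations need review\n\nRecommended Actions:\n1. Address all Critical findings within 24 hours\n2. Implement recommended security controls\n3. Schedule follow-up assessment in 7 days\n"

-- ===== PORT A =====
def generate_basic_summary (findings : List (List (String × String))) (region : String) : String :=
  let critical_count : Int := (findings.filter (fun f => pvSeverityOf f == "critical")).length
  let high_count : Int := (findings.filter (fun f => pvSeverityOf f == "high")).length
  let medium_count : Int := (findings.filter (fun f => pvSeverityOf f == "medium")).length
  pvRender region findings.length critical_count high_count medium_count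

-- ===== PORT B =====
-- port of B's inner `while k < len(rest) and rest[k] == sev: k += 1`
def pvRunLen (rest : List String) (sev : String) (k : Nat) : Nat :=
  if k < rest.length ∧ rest[k]? = some sev then pvRunLen rest sev (k + 1) else k
termination_by rest.length - k
decreasing_by omega

theorem pvRunLen_ge (rest : List String) (sev : String) (k : Nat) : k ≤ pvRunLen rest sev k := by
  fun_induction pvRunLen with
  | case1 k h ih => omega
  | case2 k h => omega

-- port of B's outer `while rest:` loop building the run-length table
def pvRuns (counts : PySem.Dict String Int) (rest : List String) : PySem.Dict String Int :=
  match rest with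
  | [] => counts
  | sev :: tl =>
      let k := pvRunLen (sev :: tl) sev 1
      pvRuns (counts.insert sev (k : Int)) ((sev :: tl).drop k)
termination_by rest.length
decreasing_by
  have h1 : 1 ≤ pvRunLen (sev :: tl) sev 1 := pvRunLen_ge _ _ _
  simp [List.length_drop]; omega

def generate_basic_summary_alt (findings : List (List (String × String))) (region : String) : String :=
  let sevs := PySem.List.sorted (findings.map pvSeverityOf) (fun x => x) false
  let counts := pvRuns PySem.Dict.empty sevs
  let critical_count := counts.getD "critical" 0
  let high_count := counts.getD "high" 0
  let medium_count := counts.getD "medium" 0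
  pvRender region findings.length critical_count high_count medium_count

-- ===== PRECONDITION & SPEC =====
def Spec_generate_basic_summary (findings : List (List (String × String))) (region : String) (out : String) : Prop := out = generate_basic_summary_alt findings region
instance (findings : List (List (String × String))) (region : String) (out : String) : Decidable (Spec_generate_basic_summary findings region out) := by unfold Spec_generate_basic_summary; infer_instance

-- ===== CLAIM (what is proved, stated in full; the proofs are below) =====
def Claim_equal_generate_basic_summary : Prop := ∀ (findings : List (List (String × String))) (region : String), Dom_generate_basic_summary findings region → Spec_generate_basic_summary findings region (generate_basic_summary findings region)

-- ===== LEMMAS AND PROOFS =====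

-- the inner index loop computes start + length of the run of `sev` from `k`
theorem pvRunLen_eq (rest : List String) (sev : String) (k : Nat) :
    pvRunLen rest sev k = k + ((rest.drop k).takeWhile (fun x => x == sev)).length := by
  fun_induction pvRunLen with
  | case1 k h ih =>
      obtain ⟨hk, hget⟩ := h
      have hd : rest.drop k = rest[k] :: rest.drop (k + 1) := List.drop_eq_getElem_cons hk
      have hx : rest[k] = sev := by
        have := List.getElem?_eq_getElem hk
        rw [this] at hget; exact Option.some_injective _ hget
      rw [ih, hd, hx]
      simp
      omega
  | case2 k h =>
      rcases Nat.lt_or_ge k rest.length with hk | hk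
      · have hget : rest[k]? = some rest[k] := List.getElem?_eq_getElem hk
        have hne : rest[k] ≠ sev := fun he => h ⟨hk, by rw [hget, he]⟩
        have hd : rest.drop k = rest[k] :: rest.drop (k + 1) := List.drop_eq_getElem_cons hk
        rw [hd]
        simp [hne]
      · simp [List.drop_eq_nil_of_le hk]

-- in a ≤-sorted tail of sev, everything surviving `dropWhile (== sev)` differs from sev
theorem pvDropWhile_ne (sev : String) (tl : List String)
    (hp : List.Pairwise (fun a b => a ≤ b) (sev :: tl)) :
    ∀ y ∈ tl.dropWhile (fun x => x == sev), y ≠ sev := by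
  induction tl with
  | nil => simp
  | cons x xs ih =>
      by_cases hx : (x == sev) = true
      · rw [List.dropWhile_cons, if_pos hx]
        have hp' : List.Pairwise (fun a b => a ≤ b) (sev :: xs) :=
          hp.sublist ((xs.sublist_cons_self x).cons₂ sev)
        exact ih hp'
      · rw [List.dropWhile_cons, if_neg hx]
        have hxne : x ≠ sev := by simpa using hx
        have hsx : sev ≤ x := (List.pairwise_cons.1 hp).1 x (by simp)
        have hlt : sev < x := lt_of_le_of_ne hsx (Ne.symm hxne)
        intro y hy
        rcases List.mem_cons.1 hy with rfl | hm
        · exact hxne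
        · have hpx : List.Pairwise (fun a b => a ≤ b) (x :: xs) :=
            (List.pairwise_cons.1 hp).2
          have hxy : x ≤ y := (List.pairwise_cons.1 hpx).1 y hm
          intro he
          rw [he] at hxy
          exact absurd hxy (not_le.2 hlt)

-- the run-length table of a sorted list answers count queries
theorem pvRuns_getD (rest : List String) (hp : List.Pairwise (fun a b => a ≤ b) rest)
    (counts : PySem.Dict String Int) (t : String) :
    (pvRuns counts rest).getD t 0 =
      if t ∈ rest then (rest.count t : Int) else counts.getD t 0 := by
  fun_induction pvRuns generalizing t with
  | case1 counts => simp
  | case2 counts sev tl k ih =>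
      have hk : k = 1 + (tl.takeWhile (fun x => x == sev)).length := by
        show pvRunLen (sev :: tl) sev 1 = _
        rw [pvRunLen_eq]; simp
      have htw : ∀ y ∈ tl.takeWhile (fun x => x == sev), y = sev := by
        intro y hy
        have := List.mem_takeWhile_imp hy
        simpa using this
      have hsplit : tl = tl.takeWhile (fun x => x == sev) ++ tl.dropWhile (fun x => x == sev) :=
        (List.takeWhile_append_dropWhile ..).symm
      have hdrop : (sev :: tl).drop k = tl.dropWhile (fun x => x == sev) := by
        rw [hk, Nat.add_comm, List.drop_succ_cons]
        nth_rewrite 2 [hsplit]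
        exact List.drop_left
      have hpd : List.Pairwise (fun a b => a ≤ b) ((sev :: tl).drop k) :=
        hp.sublist (List.drop_sublist _ _)
      have hne : ∀ y ∈ (sev :: tl).drop k, y ≠ sev := by
        rw [hdrop]; exact pvDropWhile_ne sev tl hp
      rw [ih hpd]
      by_cases ht : t = sev
      · have hnm : t ∉ (sev :: tl).drop k := fun hm => (hne t hm) ht
        rw [if_neg hnm, if_pos (by rw [ht]; exact List.mem_cons_self ..)]
        rw [PySem.Dict.getD_insert, if_pos ht, hk]
        have hcnt : (sev :: tl).count t = 1 + (tl.takeWhile (fun x => x == sev)).length := by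
          rw [ht, List.count_cons_self]
          conv_lhs => rw [hsplit]
          rw [List.count_append]
          have h1 : (tl.takeWhile (fun x => x == sev)).count sev
              = (tl.takeWhile (fun x => x == sev)).length :=
            List.count_eq_length.2 (fun b hb => (htw b hb).symm)
          have h2 : (tl.dropWhile (fun x => x == sev)).count sev = 0 :=
            List.count_eq_zero.2 (fun hm => (pvDropWhile_ne sev tl hp sev hm) rfl)
          omega
        rw [hcnt]
      · have hmem : t ∈ sev :: tl ↔ t ∈ (sev :: tl).drop k := by
          rw [hdrop]
          constructor
          · intro hm
            rcases List.mem_cons.1 hm with rfl | hm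
            · exact absurd rfl ht
            · conv at hm => rw [hsplit]
              rcases List.mem_append.1 hm with hm | hm
              · exact absurd (htw t hm) ht
              · exact hm
          · intro hm
            exact List.mem_cons.2 (Or.inr ((List.dropWhile_sublist _).mem hm))
        have hcnt : (sev :: tl).count t = ((sev :: tl).drop k).count t := by
          rw [hdrop]
          have hcc : (sev :: tl).count t = tl.count t := by
            simp [List.count_cons]
            exact fun h => ht h.symm
          rw [hcc]
          conv_lhs => rw [hsplit]
          rw [List.count_append]
          have h1 : (tl.takeWhile (fun x => x == sev)).count t = 0 :=
            List.count_eq_zero.2 (fun hm => ht (htw t hm))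
          omega
        rw [PySem.Dict.getD_insert, if_neg ht]
        by_cases hm : t ∈ sev :: tl
        · rw [if_pos hm, if_pos (hmem.1 hm), hcnt]
        · rw [if_neg hm, if_neg (fun h => hm (hmem.2 h))]

-- starting from the empty table, B's scan of the sorted list computes each count
theorem pvRuns_sorted_count (xs : List String) (t : String) :
    (pvRuns PySem.Dict.empty (PySem.List.sorted xs (fun x => x) false)).getD t 0
      = (xs.count t : Int) := by
  have hp : List.Pairwise (fun a b => a ≤ b) (PySem.List.sorted xs (fun x => x) false) :=
    PySem.List.sorted_pairwise xs (fun x => x)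
  rw [pvRuns_getD _ hp]
  have hperm : (PySem.List.sorted xs (fun x => x) false).Perm xs := PySem.List.sorted_perm ..
  by_cases hm : t ∈ PySem.List.sorted xs (fun x => x) false
  · rw [if_pos hm, hperm.count_eq]
  · rw [if_neg hm]
    have : xs.count t = 0 := List.count_eq_zero.2 (fun h => hm (hperm.mem_iff.2 h))
    simp [this, PySem.Dict.empty, PySem.Dict.getD, PySem.Dict.get?]

-- A's filtered length over findings is a count over the mapped severities
theorem pvCount_eq_filter (findings : List (List (String × String))) (t : String) :
    ((findings.map pvSeverityOf).count t : Int)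
      = ((findings.filter (fun f => pvSeverityOf f == t)).length : Int) := by
  norm_cast
  rw [List.count_eq_countP, List.countP_map, List.countP_eq_length_filter]
  simp [Function.comp_def, BEq.comm]

-- ===== VERDICT (by name: the statement is the Claim_ definition above) =====
theorem generate_basic_summary_spec : Claim_equal_generate_basic_summary := by
  intro findings region _
  show _ = _
  unfold generate_basic_summary generate_basic_summary_alt
  simp only [pvRuns_sorted_count, pvCount_eq_filter]
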